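-- pv_equiv track=rewrite | github.com/chenxinpeng/ARNet | image_captioning/utils_rewards.py | array_to_seq
-- ===== SOURCE A (Python) =====
-- def array_to_seq(arr, end_word, idx_to_word):
--     out = ''
--     for i in range(len(arr)):
--         if arr[i] != 0:
--             out += idx_to_word[arr[i]] + ' '
--             if arr[i] == end_word:
--                 break
--     return out.strip()
-- ===== SOURCE B (Python) =====
-- def array_to_seq(arr, end_word, idx_to_word):
--     words = list(arr)
--     if end_word != 0 and end_word in words:
--         words = words[:words.index(end_word) + 1]
--     return ' '.join(idx_to_word[x] for x in words if x != 0).strip()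
-- ===== Notes on version B (the rewrite author's own statement) =====
-- stated objective: idiomatic
-- what changed: A's single accumulate-and-break loop with string concatenation is replaced by a truncate-at-end_word (via .index) then filter-zeros then ' '.join decomposition.
import Mathlib
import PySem

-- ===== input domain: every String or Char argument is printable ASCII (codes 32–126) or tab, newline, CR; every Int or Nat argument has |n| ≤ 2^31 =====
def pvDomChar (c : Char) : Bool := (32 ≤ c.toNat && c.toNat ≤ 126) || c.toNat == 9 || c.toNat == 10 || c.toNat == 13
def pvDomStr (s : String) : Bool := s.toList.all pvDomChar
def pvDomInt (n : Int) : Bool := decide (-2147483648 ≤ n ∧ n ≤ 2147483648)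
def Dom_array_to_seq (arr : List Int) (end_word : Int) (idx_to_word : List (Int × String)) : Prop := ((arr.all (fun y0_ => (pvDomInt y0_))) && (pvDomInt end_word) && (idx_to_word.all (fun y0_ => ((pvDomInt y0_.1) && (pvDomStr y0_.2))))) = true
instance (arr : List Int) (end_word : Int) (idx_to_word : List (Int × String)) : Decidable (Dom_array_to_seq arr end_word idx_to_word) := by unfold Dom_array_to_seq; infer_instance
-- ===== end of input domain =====

-- B replaces A's single accumulate-and-break loop by a truncate-then-filter-then-join decomposition
-- ('idiomatic'); equal return values on Pre_ (the inputs where A's dict lookups succeed).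

-- ===== PORT A =====
-- the 'for i in range(len(arr)) … break' loop, as structural recursion over the traversed elements;
-- idx_to_word[arr[i]] can raise KeyError in Python: ported with Dict.getD, those inputs are outside Pre_.
def aToSeqLoop (end_word : Int) (idx_to_word : List (Int × String)) : List Int → String → String
  | [], out => out
  | a :: rest, out =>
    if a ≠ 0 then
      let out2 := out ++ PySem.Dict.getD ⟨idx_to_word⟩ a "" ++ " "
      if a = end_word then out2 else aToSeqLoop end_word idx_to_word rest out2
    else aToSeqLoop end_word idx_to_word rest out

def array_to_seq (arr : List Int) (end_word : Int) (idx_to_word : List (Int × String)) : String :=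
  PySem.Str.strip (aToSeqLoop end_word idx_to_word arr "")

-- ===== PORT B =====
def array_to_seq_alt (arr : List Int) (end_word : Int) (idx_to_word : List (Int × String)) : String :=
  let words := if end_word ≠ 0 ∧ end_word ∈ arr
    then arr.take (((PySem.List.index? arr end_word).getD 0) + 1)
    else arr
  PySem.Str.strip (PySem.Str.join " "
    ((words.filter (fun x => x ≠ 0)).map (fun x => PySem.Dict.getD ⟨idx_to_word⟩ x "")))

-- ===== PRECONDITION & SPEC =====
-- Pre_ excludes exactly the inputs on which A raises KeyError: some nonzero entry of the prefix A
-- actually scans (up to and including the first occurrence of a nonzero end_word) is not a key of idx_to_word.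
def Pre_array_to_seq (arr : List Int) (end_word : Int) (idx_to_word : List (Int × String)) : Prop :=
  ∀ x ∈ (if end_word ≠ 0 ∧ end_word ∈ arr then arr.take (arr.idxOf end_word + 1) else arr),
    x ≠ 0 → x ∈ idx_to_word.map Prod.fst
instance (arr : List Int) (end_word : Int) (idx_to_word : List (Int × String)) : Decidable (Pre_array_to_seq arr end_word idx_to_word) := by unfold Pre_array_to_seq; infer_instance

def pvWitness_array_to_seq : List Int × Int × (List (Int × String)) :=
  ([3, 0, 1, 2, 5], 2, [(1, "a"), (2, "<end>"), (3, " the ")])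

def Spec_array_to_seq (arr : List Int) (end_word : Int) (idx_to_word : List (Int × String)) (out : String) : Prop := out = array_to_seq_alt arr end_word idx_to_word
instance (arr : List Int) (end_word : Int) (idx_to_word : List (Int × String)) (out : String) : Decidable (Spec_array_to_seq arr end_word idx_to_word out) := by unfold Spec_array_to_seq; infer_instance

-- ===== CLAIM (what is proved, stated in full; the proofs are below) =====
def Claim_equal_array_to_seq : Prop := ∀ (arr : List Int) (end_word : Int) (idx_to_word : List (Int × String)), Dom_array_to_seq arr end_word idx_to_word → Pre_array_to_seq arr end_word idx_to_word → Spec_array_to_seq arr end_word idx_to_word (array_to_seq arr end_word idx_to_word)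

-- ===== LEMMAS AND PROOFS =====

-- proof-side recursive truncation: the prefix A scans when end_word ≠ 0
def truncR (ew : Int) : List Int → List Int
  | [] => []
  | a :: l => if a = ew then [a] else a :: truncR ew l

def procPrefix (ew : Int) (l : List Int) : List Int :=
  if ew = 0 then l else truncR ew l

lemma truncR_of_not_mem (ew : Int) (l : List Int) (h : ew ∉ l) : truncR ew l = l := by
  induction l with
  | nil => rfl
  | cons a r ih =>
      simp only [List.mem_cons, not_or] at h
      simp [truncR, Ne.symm h.1, ih h.2]

lemma take_idxOf_eq_truncR (ew : Int) (l : List Int) (h : ew ∈ l) :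
    l.take (l.idxOf ew + 1) = truncR ew l := by
  induction l with
  | nil => cases h
  | cons a r ih =>
      by_cases ha : a = ew
      · subst ha; simp [truncR]
      · have hr : ew ∈ r := by
          rcases List.mem_cons.mp h with h1 | h1
          · exact absurd h1.symm ha
          · exact h1
        have hbe : (a == ew) = false := by simp [ha]
        simp [truncR, ha, List.take_succ_cons, ih hr]

lemma getD_idxOf? (l : List Int) (v : Int) (h : v ∈ l) :
    (List.idxOf? v l).getD 0 = l.idxOf v := by
  induction l with
  | nil => cases h
  | cons a r ih =>
      by_cases ha : a = v
      · subst ha; simp [List.idxOf?_cons]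
      · have hbe : (a == v) = false := by simp [ha]
        simp only [List.idxOf?_cons, List.idxOf_cons, hbe, cond_false]
        rcases List.mem_cons.mp h with h1 | h1
        · exact absurd h1.symm ha
        · cases hq : List.idxOf? v r with
          | none => rw [List.idxOf?_eq_none_iff] at hq; exact absurd h1 hq
          | some k => simp [hq, ← ih h1]

-- the words A emits (with their trailing space), as char lists
def wordChars (d : List (Int × String)) (l : List Int) : List (List Char) :=
  (l.filter (fun x => x ≠ 0)).map (fun x => (PySem.Dict.getD ⟨d⟩ x "").toList)

lemma loop_toList (ew : Int) (d : List (Int × String)) (l : List Int) :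
    ∀ out, (aToSeqLoop ew d l out).toList =
      out.toList ++ ((wordChars d (procPrefix ew l)).map (fun w => w ++ [' '])).flatten := by
  induction l with
  | nil =>
      intro out
      by_cases hew : ew = 0 <;> simp [aToSeqLoop, procPrefix, truncR, wordChars, hew]
  | cons a r ih =>
      intro out
      by_cases ha : a = 0
      · subst ha
        rw [show aToSeqLoop ew d (0 :: r) out = aToSeqLoop ew d r out from by simp [aToSeqLoop]]
        rw [ih]
        unfold procPrefix
        by_cases hew : ew = 0
        · simp [hew, wordChars]
        · simp [hew, truncR, Ne.symm hew, wordChars]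
      · by_cases hb : a = ew
        · subst hb
          simp only [aToSeqLoop, if_pos ha]
          unfold procPrefix
          simp [ha, truncR, wordChars]
        · simp only [aToSeqLoop, if_pos ha, if_neg hb]
          rw [ih]
          unfold procPrefix
          by_cases hew : ew = 0
          · simp [hew, wordChars, ha]
          · simp [hew, truncR, hb, wordChars, ha]

lemma flatten_words_eq_join (ws : List (List Char)) (hne : ws ≠ []) :
    (ws.map (fun w => w ++ [' '])).flatten = PySem.Chars.join [' '] ws ++ [' '] := by
  induction ws with
  | nil => exact absurd rfl hne
  | cons w r ih =>
      cases r with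
      | nil => simp [PySem.Chars.join_singleton]
      | cons v t =>
          simp [PySem.Chars.join_cons_cons, List.append_assoc]
          simpa using ih (by simp)

lemma chars_rstrip_append_space (l : List Char) :
    PySem.Chars.rstrip (l ++ [' ']) = PySem.Chars.rstrip l := by
  simp [PySem.Chars.rstrip, show PySem.Chars.isspace ' ' = true from rfl]

lemma chars_strip_append_space (l : List Char) :
    PySem.Chars.strip (l ++ [' ']) = PySem.Chars.strip l := by
  unfold PySem.Chars.strip PySem.Chars.lstrip
  rw [List.dropWhile_append]
  by_cases h : (List.dropWhile PySem.Chars.isspace l).isEmpty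
  · rw [if_pos h]
    rw [List.isEmpty_iff] at h
    simp [h, PySem.Chars.rstrip, show PySem.Chars.isspace ' ' = true from rfl, List.dropWhile]
  · rw [if_neg h, chars_rstrip_append_space]

-- B's port, through procPrefix, at the char-list level
lemma alt_toList (arr : List Int) (ew : Int) (d : List (Int × String)) :
    (array_to_seq_alt arr ew d).toList =
      PySem.Chars.strip (PySem.Chars.join [' '] (wordChars d (procPrefix ew arr))) := by
  unfold array_to_seq_alt
  have hwords : (if ew ≠ 0 ∧ ew ∈ arr
      then arr.take (((PySem.List.index? arr ew).getD 0) + 1) else arr) = procPrefix ew arr := by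
    unfold procPrefix
    by_cases h : ew ≠ 0 ∧ ew ∈ arr
    · rw [if_pos h, if_neg h.1, PySem.List.index?_eq_idxOf?, getD_idxOf? _ _ h.2,
        take_idxOf_eq_truncR _ _ h.2]
    · rw [if_neg h]
      push Not at h
      by_cases hew : ew = 0
      · simp [hew]
      · rw [if_neg hew, truncR_of_not_mem _ _ (h hew)]
  rw [hwords, PySem.Str.toList_strip, PySem.Str.toList_join]
  simp [wordChars, PySem.Chars.join, List.map_map]
  rfl

-- ===== VERDICT (by name: the statement is the Claim_ definition above) =====
theorem array_to_seq_spec : Claim_equal_array_to_seq := by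
  intro arr ew d _ _
  unfold Spec_array_to_seq array_to_seq
  have hA : (aToSeqLoop ew d arr "").toList =
      ((wordChars d (procPrefix ew arr)).map (fun w => w ++ [' '])).flatten := by
    simpa using loop_toList ew d arr ""
  have : (PySem.Str.strip (aToSeqLoop ew d arr "")).toList = (array_to_seq_alt arr ew d).toList := by
    rw [PySem.Str.toList_strip, hA, alt_toList]
    cases hws : wordChars d (procPrefix ew arr) with
    | nil => simp [PySem.Chars.join_nil]
    | cons w r => rw [flatten_words_eq_join _ (by simp), chars_strip_append_space]
  calc PySem.Str.strip (aToSeqLoop ew d arr "")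
      = String.ofList (PySem.Str.strip (aToSeqLoop ew d arr "")).toList := by rw [String.ofList_toList]
    _ = String.ofList (array_to_seq_alt arr ew d).toList := by rw [this]
    _ = array_to_seq_alt arr ew d := String.ofList_toList
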